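-- pv_equiv track=rewrite | github.com/ZCatspurr/Object-Detection-RaspPi4 | detect.py | get_matching_route
-- ===== SOURCE A (Python) =====
-- def get_matching_route(detected_route, avail_routes):
--     route_mappings = {
--         'S': ['GS', 'FS', 'H'],
--         '6': ['6', '6X'],
--         '7': ['7', '7X']
--     }
--
--     if detected_route in route_mappings:
--         for possible_id in route_mappings[detected_route]:
--             if possible_id in avail_routes:
--                 return possible_id
--
--     if detected_route in avail_routes:
--         return detected_route
--
--     return None
-- ===== SOURCE B (Python) =====
-- def get_matching_route(detected_route, avail_routes):
--     route_mappings = {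
--         'S': ['GS', 'FS', 'H'],
--         '6': ['6', '6X'],
--         '7': ['7', '7X']
--     }
--     # Priority table: each acceptable route ID -> its priority (lower = better);
--     # the detected route itself is the lowest-priority fallback.
--     alts = route_mappings.get(detected_route, [])
--     rank = {c: i for i, c in enumerate(alts)}
--     rank.setdefault(detected_route, len(alts))
--     # Single scan of the available routes, keeping the best-ranked acceptable one.
--     hits = [r for r in avail_routes if r in rank]
--     return min(hits, key=rank.__getitem__, default=None)
-- ===== Notes on version B (the rewrite author's own statement) =====
-- stated objective: alternative
-- what changed: A scans the candidate IDs in priority order testing each against avail_routes (plus a separate fallback membership test of detected_route); B instead builds a priority table (candidate -> rank, detected_route as lowest-priority entry) and makes a single pass over avail_routes, returning the best-ranked available route via min with a key.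
import Mathlib
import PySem

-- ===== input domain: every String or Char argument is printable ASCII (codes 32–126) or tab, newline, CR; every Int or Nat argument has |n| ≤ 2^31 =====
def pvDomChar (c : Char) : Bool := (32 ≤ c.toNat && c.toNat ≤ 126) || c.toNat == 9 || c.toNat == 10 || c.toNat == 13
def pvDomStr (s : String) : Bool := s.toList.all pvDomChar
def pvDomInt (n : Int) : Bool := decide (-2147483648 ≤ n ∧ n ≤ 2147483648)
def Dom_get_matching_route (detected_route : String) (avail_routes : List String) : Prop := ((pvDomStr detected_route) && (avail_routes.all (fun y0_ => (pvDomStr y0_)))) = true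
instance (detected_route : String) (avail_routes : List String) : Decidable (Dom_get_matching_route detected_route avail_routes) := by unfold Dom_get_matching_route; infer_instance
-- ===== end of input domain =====

-- B replaces A's ordered scan of the candidate IDs by a priority table and a single
-- min-by-rank scan of avail_routes; objective: alternative (same cost, different traversal).

-- ===== PORT A =====
-- the literal dict from A
def routeMappingsA : PySem.Dict String (List String) :=
  ((PySem.Dict.empty.insert "S" ["GS", "FS", "H"]).insert "6" ["6", "6X"]).insert "7" ["7", "7X"]

-- A's for loop: return the first possible_id that is in avail_routes
def loopA : List String → List String → Option String
  | [], _ => none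
  | p :: rest, avail => if avail.contains p then some p else loopA rest avail

def get_matching_route (detected_route : String) (avail_routes : List String) : Option String :=
  let fromMap : Option String :=
    if routeMappingsA.contains detected_route then
      loopA (routeMappingsA.getD detected_route []) avail_routes
    else none
  match fromMap with
  | some x => some x
  | none => if avail_routes.contains detected_route then some detected_route else none

-- ===== PORT B =====
def get_matching_route_alt (detected_route : String) (avail_routes : List String) : Option String :=
  let route_mappings : PySem.Dict String (List String) :=
    ((PySem.Dict.empty.insert "S" ["GS", "FS", "H"]).insert "6" ["6", "6X"]).insert "7" ["7", "7X"]
  let alts := route_mappings.getD detected_route []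
  -- rank = {c: i for i, c in enumerate(alts)}; rank.setdefault(detected_route, len(alts))
  let rank : PySem.Dict String Int :=
    ((PySem.List.enumerate alts 0).foldl (fun acc p => acc.insert p.2 p.1)
      PySem.Dict.empty).setdefault detected_route (alts.length : Int)
  -- hits = [r for r in avail_routes if r in rank]
  let hits := avail_routes.filter (fun r => rank.contains r)
  -- min(hits, key=rank.__getitem__, default=None)
  PySem.List.min? hits (fun r => rank.getD r 0)

-- ===== PRECONDITION & SPEC =====
def Spec_get_matching_route (detected_route : String) (avail_routes : List String) (out : Option String) : Prop := out = get_matching_route_alt detected_route avail_routes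
instance (detected_route : String) (avail_routes : List String) (out : Option String) : Decidable (Spec_get_matching_route detected_route avail_routes out) := by unfold Spec_get_matching_route; infer_instance

-- ===== CLAIM (what is proved, stated in full; the proofs are below) =====
def Claim_equal_get_matching_route : Prop := ∀ (detected_route : String) (avail_routes : List String), Dom_get_matching_route detected_route avail_routes → Spec_get_matching_route detected_route avail_routes (get_matching_route detected_route avail_routes)


-- ===== LEMMAS AND PROOFS =====

-- the concrete rank tables B builds for each mapped detected_route
def rankS : PySem.Dict String Int := PySem.Dict.mk [("GS", 0), ("FS", 1), ("H", 2), ("S", 3)]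
def rank6 : PySem.Dict String Int := PySem.Dict.mk [("6", 0), ("6X", 1)]
def rank7 : PySem.Dict String Int := PySem.Dict.mk [("7", 0), ("7X", 1)]

-- along a strictly rank-sorted list, the first hit has minimal rank among all hits
theorem find?_rank_le (K : List String) (rk : String → Int) (p : String → Bool)
    (hsort : K.Pairwise (fun a b => rk a < rk b)) (k0 : String)
    (hf : K.find? p = some k0) :
    ∀ m ∈ K, p m → rk k0 ≤ rk m := by
  induction K with
  | nil => simp at hf
  | cons k t ih =>
    rcases List.pairwise_cons.mp hsort with ⟨hk, ht⟩
    by_cases hp : p k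
    · rw [List.find?_cons_of_pos hp] at hf
      cases hf
      intro m hm _
      rcases List.mem_cons.mp hm with hm | hm
      · simp [hm]
      · exact le_of_lt (hk m hm)
    · rw [List.find?_cons_of_neg hp] at hf
      intro m hm hpm
      rcases List.mem_cons.mp hm with hm | hm
      · exact absurd hpm (hm ▸ hp)
      · exact ih ht hf m hm hpm

-- strict rank-sortedness makes rk injective on the list
theorem rank_inj (K : List String) (rk : String → Int)
    (hsort : K.Pairwise (fun a b => rk a < rk b)) :
    ∀ a ∈ K, ∀ b ∈ K, rk a = rk b → a = b := by
  induction K with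
  | nil => simp
  | cons k t ih =>
    rcases List.pairwise_cons.mp hsort with ⟨hk, ht⟩
    intro a ha b hb hab
    rcases List.mem_cons.mp ha with ha | ha <;> rcases List.mem_cons.mp hb with hb | hb
    · rw [ha, hb]
    · exact absurd (ha ▸ hab) (ne_of_lt (hk b hb))
    · exact absurd (hb ▸ hab).symm (ne_of_lt (hk a ha))
    · exact ih ht a ha b hb hab

-- the core bridge: the first candidate (in K's order) present in avail equals
-- the minimum-rank element of the hits drawn from avail
theorem find?_eq_min? (K : List String) (rk : String → Int) (avail : List String)
    (hsort : K.Pairwise (fun a b => rk a < rk b)) :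
    K.find? (fun c => avail.contains c)
      = PySem.List.min? (avail.filter (fun r => K.contains r)) rk := by
  cases hmin : PySem.List.min? (avail.filter (fun r => K.contains r)) rk with
  | none =>
    have hnil := (PySem.List.min?_eq_none_iff _ _).mp hmin
    have hno : ∀ r ∈ avail, ¬ r ∈ K := by
      intro r hr hrk
      have hmem : r ∈ avail.filter (fun r => K.contains r) := by
        simp [List.mem_filter, hr, hrk]
      rw [hnil] at hmem
      simp at hmem
    apply List.find?_eq_none.mpr
    intro c hc
    simp only [List.contains_eq_mem, decide_eq_true_eq]
    intro hca
    exact hno c hca hc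
  | some m =>
    have hm := PySem.List.min?_mem hmin
    rcases List.mem_filter.mp hm with ⟨hma, hmk⟩
    have hmk' : m ∈ K := by simpa using hmk
    have hma' : m ∈ avail := hma
    have hex : ∃ k0, K.find? (fun c => avail.contains c) = some k0 := by
      cases hfind : K.find? (fun c => avail.contains c) with
      | none =>
        exfalso
        have := List.find?_eq_none.mp hfind m hmk'
        simp [hma'] at this
      | some k0 => exact ⟨k0, rfl⟩
    rcases hex with ⟨k0, hf⟩
    have hk0K : k0 ∈ K := List.mem_of_find?_eq_some hf
    have hk0a : k0 ∈ avail := by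
      have := List.find?_some hf
      simpa using this
    have hk0hit : k0 ∈ avail.filter (fun r => K.contains r) := by
      simp [List.mem_filter, hk0a, hk0K]
    have h1 : rk m ≤ rk k0 := PySem.List.min?_isMin hmin k0 hk0hit
    have h2 : rk k0 ≤ rk m :=
      find?_rank_le K rk _ hsort k0 hf m hmk' (by simpa using hma')
    rw [hf]
    exact congrArg some (rank_inj K rk hsort k0 hk0K m hmk' (le_antisymm h2 h1))

-- A reduced to a find? over its candidate list, per shape of detected_route
theorem a_eq_find_S (avail : List String) :
    get_matching_route "S" avail
      = (["GS", "FS", "H", "S"] : List String).find? (fun c => avail.contains c) := by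
  have h : get_matching_route "S" avail
      = (match loopA ["GS", "FS", "H"] avail with
         | some x => some x
         | none => if avail.contains "S" then some "S" else none) := rfl
  rw [h]
  by_cases h1 : "GS" ∈ avail <;> by_cases h2 : "FS" ∈ avail <;>
    by_cases h3 : "H" ∈ avail <;> by_cases h4 : "S" ∈ avail <;>
    simp [loopA, h1, h2, h3, h4]

theorem a_eq_find_6 (avail : List String) :
    get_matching_route "6" avail
      = (["6", "6X"] : List String).find? (fun c => avail.contains c) := by
  have h : get_matching_route "6" avail
      = (match loopA ["6", "6X"] avail with
         | some x => some x
         | none => if avail.contains "6" then some "6" else none) := rfl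
  rw [h]
  by_cases h1 : "6" ∈ avail <;> by_cases h2 : "6X" ∈ avail <;>
    simp [loopA, h1, h2]

theorem a_eq_find_7 (avail : List String) :
    get_matching_route "7" avail
      = (["7", "7X"] : List String).find? (fun c => avail.contains c) := by
  have h : get_matching_route "7" avail
      = (match loopA ["7", "7X"] avail with
         | some x => some x
         | none => if avail.contains "7" then some "7" else none) := rfl
  rw [h]
  by_cases h1 : "7" ∈ avail <;> by_cases h2 : "7X" ∈ avail <;>
    simp [loopA, h1, h2]

theorem a_eq_find_other (d : String) (avail : List String)
    (hS : d ≠ "S") (h6 : d ≠ "6") (h7 : d ≠ "7") :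
    get_matching_route d avail
      = ([d] : List String).find? (fun c => avail.contains c) := by
  have hc : routeMappingsA.contains d = false := by
    simp [routeMappingsA, PySem.Dict.contains_insert, PySem.Dict.contains_empty,
      beq_eq_decide, hS, h6, h7]
  by_cases h : d ∈ avail <;> simp [get_matching_route, hc, h]

-- B reduced to a min? over the hits with the concrete rank table, per shape
theorem b_eq_S (avail : List String) :
    get_matching_route_alt "S" avail
      = PySem.List.min? (avail.filter (fun r => rankS.contains r))
          (fun r => rankS.getD r 0) := rfl

theorem b_eq_6 (avail : List String) :
    get_matching_route_alt "6" avail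
      = PySem.List.min? (avail.filter (fun r => rank6.contains r))
          (fun r => rank6.getD r 0) := rfl

theorem b_eq_7 (avail : List String) :
    get_matching_route_alt "7" avail
      = PySem.List.min? (avail.filter (fun r => rank7.contains r))
          (fun r => rank7.getD r 0) := rfl

theorem b_eq_other (d : String) (avail : List String)
    (hS : d ≠ "S") (h6 : d ≠ "6") (h7 : d ≠ "7") :
    get_matching_route_alt d avail
      = PySem.List.min? (avail.filter (fun r => (PySem.Dict.empty.insert d (0 : Int)).contains r))
          (fun r => (PySem.Dict.empty.insert d (0 : Int)).getD r 0) := by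
  have hc : (((PySem.Dict.empty.insert "S" ["GS", "FS", "H"]).insert "6"
      ["6", "6X"]).insert "7" ["7", "7X"]).contains d = false := by
    simp [PySem.Dict.contains_insert, PySem.Dict.contains_empty, beq_eq_decide, hS, h6, h7]
  simp only [get_matching_route_alt]
  rw [PySem.Dict.getD_of_not_contains _ _ hc]
  simp [PySem.List.enumerate, PySem.Dict.setdefault_of_not_contains, PySem.Dict.contains_empty]

-- per-shape pointwise agreement of the membership tests
theorem contains_S (r : String) : rankS.contains r = (["GS", "FS", "H", "S"] : List String).contains r := by
  simp [rankS, BEq.comm, beq_eq_decide]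

theorem contains_6 (r : String) : rank6.contains r = (["6", "6X"] : List String).contains r := by
  simp [rank6, BEq.comm, beq_eq_decide]

theorem contains_7 (r : String) : rank7.contains r = (["7", "7X"] : List String).contains r := by
  simp [rank7, BEq.comm, beq_eq_decide]

theorem contains_other (d r : String) :
    (PySem.Dict.empty.insert d (0 : Int)).contains r = ([d] : List String).contains r := by
  simp [PySem.Dict.contains_insert, PySem.Dict.contains_empty, BEq.comm, beq_eq_decide, eq_comm]

theorem get_matching_route_eq (d : String) (avail : List String) :
    get_matching_route d avail = get_matching_route_alt d avail := by
  by_cases hS : d = "S"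
  · subst hS
    rw [a_eq_find_S, b_eq_S,
      List.filter_congr (fun r _ => contains_S r)]
    exact find?_eq_min? _ _ avail (by decide)
  by_cases h6 : d = "6"
  · subst h6
    rw [a_eq_find_6, b_eq_6,
      List.filter_congr (fun r _ => contains_6 r)]
    exact find?_eq_min? _ _ avail (by decide)
  by_cases h7 : d = "7"
  · subst h7
    rw [a_eq_find_7, b_eq_7,
      List.filter_congr (fun r _ => contains_7 r)]
    exact find?_eq_min? _ _ avail (by decide)
  · rw [a_eq_find_other d avail hS h6 h7, b_eq_other d avail hS h6 h7,
      List.filter_congr (fun r _ => contains_other d r)]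
    exact find?_eq_min? _ _ avail (by simp)

-- ===== VERDICT (by name: the statement is the Claim_ definition above) =====
theorem get_matching_route_spec : Claim_equal_get_matching_route := by
  intro d avail _
  unfold Spec_get_matching_route
  exact get_matching_route_eq d avail
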